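-- pv_equiv track=rewrite | github.com/Ic1558/02luka | tools/paula_data_crawler.py | combine_and_sort
-- ===== SOURCE A (Python) =====
-- def combine_and_sort(rows):
--     """Combine and deduplicate rows by timestamp + close price."""
--     uniq = {}
--     for r in rows:
--         if r.get("timestamp") and r.get("close"):
--             key = (r["timestamp"], r["close"])
--             if key not in uniq:
--                 uniq[key] = r
--
--     out = list(uniq.values())
--     out.sort(key=lambda x: x.get("timestamp", ""))
--     return out
-- ===== SOURCE B (Python) =====
-- def combine_and_sort(rows):
--     """Combine and deduplicate rows by timestamp + close price, without hash tables:
--     decorate with the original index, sort by (timestamp, close) so duplicates become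
--     adjacent, keep the first row of each adjacent group, then restore timestamp order
--     (ties by original position) with a second sort by (timestamp, index)."""
--     tagged = [(i, r) for i, r in enumerate(rows) if r.get("timestamp") and r.get("close")]
--     tagged.sort(key=lambda e: (e[1].get("timestamp", ""), e[1].get("close", "")))
--     firsts = []
--     prev = None
--     for i, r in tagged:
--         k = (r.get("timestamp", ""), r.get("close", ""))
--         if k != prev:
--             firsts.append((i, r))
--             prev = k
--     firsts.sort(key=lambda e: (e[1].get("timestamp", ""), e[0]))
--     return [r for _, r in firsts]
-- ===== Notes on version B (the rewrite author's own statement) =====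
-- stated objective: alternative
-- what changed: A dedups with a hash dict keyed by (timestamp, close) and then sorts the dict values; B uses no hash structure at all: it decorates rows with their index, sorts by the full (timestamp, close) key so duplicates become adjacent, removes adjacent duplicates by comparing each key with the previous one, and restores A's order with a second sort by (timestamp, index).
import Mathlib
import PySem

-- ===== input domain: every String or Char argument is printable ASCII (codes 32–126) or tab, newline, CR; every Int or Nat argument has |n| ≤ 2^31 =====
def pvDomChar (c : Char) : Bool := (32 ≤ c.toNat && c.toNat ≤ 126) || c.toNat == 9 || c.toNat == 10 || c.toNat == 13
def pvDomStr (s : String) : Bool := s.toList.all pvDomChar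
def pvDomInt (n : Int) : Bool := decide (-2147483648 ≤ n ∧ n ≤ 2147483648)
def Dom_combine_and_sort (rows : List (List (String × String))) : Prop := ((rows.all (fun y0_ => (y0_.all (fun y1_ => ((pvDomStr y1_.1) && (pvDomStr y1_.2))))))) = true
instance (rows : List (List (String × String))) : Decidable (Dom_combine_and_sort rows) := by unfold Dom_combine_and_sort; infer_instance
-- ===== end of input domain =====

-- B replaces A's hash-dict dedup + sort by a hash-free decorate / sort by full (timestamp, close) key /
-- adjacent-duplicate removal / re-sort by (timestamp, original index) pipeline (alternative algorithm, same cost).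

-- ===== PORT A =====
-- Shared accessors (the literal sub-expressions of both Pythons): truthiness of r.get(k) (None or "" are falsy)
-- is getD k "" != ""; r["timestamp"] / r["close"] are only read under the guard that both are truthy,
-- so porting them with getD "" is exact there.
def pvKeep (r : List (String × String)) : Bool :=
  ((PySem.Dict.mk r).getD "timestamp" "" != "") && ((PySem.Dict.mk r).getD "close" "" != "")
def pvT (r : List (String × String)) : String := (PySem.Dict.mk r).getD "timestamp" ""
def pvC (r : List (String × String)) : String := (PySem.Dict.mk r).getD "close" ""
def pvK (r : List (String × String)) : String × String := (pvT r, pvC r)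

-- the body of A's for-loop
def pvStepA (uniq : PySem.Dict (String × String) (List (String × String)))
    (r : List (String × String)) : PySem.Dict (String × String) (List (String × String)) :=
  if pvKeep r then
    let key := pvK r
    if uniq.contains key then uniq else uniq.insert key r
  else uniq

def combine_and_sort (rows : List (List (String × String))) : List (List (String × String)) :=
  let uniq := rows.foldl pvStepA PySem.Dict.empty
  PySem.List.sorted uniq.values (fun x => pvT x) false

-- ===== PORT B =====
-- Source B: tagged = [(i, r) for i, r in enumerate(rows) if truthy]; sort by (timestamp, close);
-- one pass appending a row only when its key differs from the previous key; re-sort by (timestamp, index); drop tags.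
-- the body of B's for-loop, on the state (prev, firsts)
def pvStepB (st : Option (String × String) × List (Int × List (String × String)))
    (e : Int × List (String × String)) :
    Option (String × String) × List (Int × List (String × String)) :=
  let k := pvK e.2
  if some k != st.1 then (some k, st.2 ++ [e]) else st

def combine_and_sort_alt (rows : List (List (String × String))) : List (List (String × String)) :=
  let tagged := (PySem.List.enumerate rows).filter (fun e => pvKeep e.2)
  let tagged1 := PySem.List.sorted2 tagged (fun e => pvT e.2) (fun e => pvC e.2) false
  let firsts := (tagged1.foldl pvStepB (none, [])).2
  let firsts1 := PySem.List.sorted2 firsts (fun e => pvT e.2) (fun e => e.1) false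
  firsts1.map (·.2)

-- ===== PRECONDITION & SPEC =====
def Spec_combine_and_sort (rows : List (List (String × String))) (out : List (List (String × String))) : Prop := out = combine_and_sort_alt rows
instance (rows : List (List (String × String))) (out : List (List (String × String))) : Decidable (Spec_combine_and_sort rows out) := by unfold Spec_combine_and_sort; infer_instance

-- ===== CLAIM (what is proved, stated in full; the proofs are below) =====
def Claim_equal_combine_and_sort : Prop := ∀ (rows : List (List (String × String))), Dom_combine_and_sort rows → Spec_combine_and_sort rows (combine_and_sort rows)

-- ===== LEMMAS AND PROOFS =====

-- keep-first dedup by an arbitrary key, recursive characterisation (used for BOTH ports' bridges)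
def pvDedupK {α K : Type} [DecidableEq K] (k : α → K) : List α → List α
  | [] => []
  | y :: ys => y :: pvDedupK k (ys.filter (fun z => decide (k z ≠ k y)))
termination_by l => l.length
decreasing_by simpa using Nat.lt_succ_of_le (le_trans (List.length_filter_le _ _) (Nat.le_of_eq (List.length_attach)))

def pvKLt {α K : Type} [LinearOrder K] (k : α → K) (a b : α) : Bool := decide (k a < k b)

-- B's decorated sort keys as lexicographic keys
def pvLexTC (e : Int × List (String × String)) : Lex (String × String) := toLex (pvT e.2, pvC e.2)
def pvLexTI (e : Int × List (String × String)) : Lex (String × Int) := toLex (pvT e.2, e.1)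

-- sorted2 (a Python tuple key) IS sorted with the lexicographic key
theorem pv_sorted2_eq {α κ₁ κ₂ : Type} [LinearOrder κ₁] [LinearOrder κ₂]
    (xs : List α) (k1 : α → κ₁) (k2 : α → κ₂) :
    PySem.List.sorted2 xs k1 k2 false
      = PySem.List.sorted xs (fun x => (toLex (k1 x, k2 x) : Lex (κ₁ × κ₂))) false := by
  have h : (fun a b : α => decide (k1 a < k1 b) || (!decide (k1 b < k1 a) && decide (k2 a < k2 b)))
      = fun a b : α =>
        decide ((toLex (k1 a, k2 a) : Lex (κ₁ × κ₂)) < toLex (k1 b, k2 b)) := by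
    funext a b
    rcases lt_trichotomy (k1 a) (k1 b) with h1 | h1 | h1
    · simp [Prod.Lex.toLex_lt_toLex, h1, asymm h1]
    · simp [Prod.Lex.toLex_lt_toLex, h1]
    · simp [Prod.Lex.toLex_lt_toLex, h1, asymm h1, h1.ne']
  show xs.foldl (fun acc x => PySem.List.insertBy _ x acc) []
      = xs.foldl (fun acc x => PySem.List.insertBy _ x acc) []
  rw [h]

-- insertBy at the very front when x is strictly below every element
theorem pv_insert_front {α K : Type} [LinearOrder K] (k : α → K) (x : α) (ys : List α)
    (h : ∀ z ∈ ys, pvKLt k x z = true) :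
    PySem.List.insertBy (pvKLt k) x ys = x :: ys := by
  cases ys with
  | nil => rfl
  | cons y t => simp [PySem.List.insertBy, h y (by simp)]

-- filter drops the inserted element when the predicate rejects it
theorem pv_filter_insertBy_neg {α K : Type} [LinearOrder K] (k : α → K)
    (p : α → Bool) (x : α) (ys : List α) (hx : p x = false) :
    (PySem.List.insertBy (pvKLt k) x ys).filter p = ys.filter p := by
  induction ys with
  | nil => simp [PySem.List.insertBy, hx]
  | cons y t ih =>
    by_cases h : pvKLt k x y = true
    · simp [PySem.List.insertBy, h, hx]
    · simp only [PySem.List.insertBy, h, List.filter_cons]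
      cases hp : p y <;> simp [hp, ih]

-- filter commutes with insertBy into a key-sorted list when the predicate keeps x
theorem pv_filter_insertBy_pos {α K : Type} [LinearOrder K] (k : α → K)
    (p : α → Bool) (x : α) (ys : List α) (hs : ys.Pairwise (fun a b => k a ≤ k b))
    (hx : p x = true) :
    (PySem.List.insertBy (pvKLt k) x ys).filter p
      = PySem.List.insertBy (pvKLt k) x (ys.filter p) := by
  induction ys with
  | nil => simp [PySem.List.insertBy, hx]
  | cons y t ih =>
    rcases List.pairwise_cons.mp hs with ⟨hy, ht⟩
    by_cases h : pvKLt k x y = true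
    · cases hp : p y with
      | true => simp [PySem.List.insertBy, h, hx, hp]
      | false =>
        have hall : ∀ z ∈ t.filter p, pvKLt k x z = true := by
          intro z hz
          have hzt := List.mem_of_mem_filter hz
          have h1 : k x < k y := of_decide_eq_true h
          have h2 : k y ≤ k z := hy z hzt
          exact decide_eq_true (lt_of_lt_of_le h1 h2)
        simp [PySem.List.insertBy, h, hx, hp, pv_insert_front k x _ hall]
    · cases hp : p y with
      | true => simp [PySem.List.insertBy, h, hp, ih ht]
      | false => simp [PySem.List.insertBy, h, hp, ih ht]

-- inserting an element with a FRESH key commutes with dedup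
theorem pv_dedup_insertBy_fresh {α K : Type} [LinearOrder K] [DecidableEq K] (k : α → K) (x : α) :
    ∀ n (ys : List α), ys.length ≤ n →
    ys.Pairwise (fun a b => k a ≤ k b) → k x ∉ ys.map k →
    pvDedupK k (PySem.List.insertBy (pvKLt k) x ys)
      = PySem.List.insertBy (pvKLt k) x (pvDedupK k ys) := by
  intro n
  induction n with
  | zero =>
    intro ys hl _ _
    have : ys = [] := List.eq_nil_of_length_eq_zero (Nat.le_zero.mp hl)
    subst this
    simp [PySem.List.insertBy, pvDedupK]
  | succ n ih =>
    intro ys hl hs hf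
    match ys with
    | [] => simp [PySem.List.insertBy, pvDedupK]
    | y :: ys =>
      rcases List.pairwise_cons.mp hs with ⟨hy, ht⟩
      have hxy : k x ≠ k y := fun he => hf (by simp [he])
      have hxs : k x ∉ ys.map k := fun hm => hf (by simp; right; simpa using hm)
      by_cases h : pvKLt k x y = true
      · rw [show PySem.List.insertBy (pvKLt k) x (y :: ys) = x :: y :: ys from by
          simp [PySem.List.insertBy, h]]
        rw [pvDedupK]
        have hself : (y :: ys).filter (fun z => decide (k z ≠ k x)) = y :: ys := by
          apply List.filter_eq_self.mpr
          intro z hz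
          simp only [decide_eq_true_eq, ne_eq]
          intro hzx
          exact hf (List.mem_map.mpr ⟨z, hz, hzx.symm ▸ rfl⟩)
        rw [hself, pvDedupK]
        simp [PySem.List.insertBy, h]
      · rw [show PySem.List.insertBy (pvKLt k) x (y :: ys)
            = y :: PySem.List.insertBy (pvKLt k) x ys from by
          simp [PySem.List.insertBy, h]]
        rw [pvDedupK, pvDedupK]
        rw [show PySem.List.insertBy (pvKLt k) x
              (y :: pvDedupK k (ys.filter (fun z => decide (k z ≠ k y))))
            = y :: PySem.List.insertBy (pvKLt k) x
                (pvDedupK k (ys.filter (fun z => decide (k z ≠ k y)))) from by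
          simp [PySem.List.insertBy, h]]
        congr 1
        rw [pv_filter_insertBy_pos k _ x ys ht (by simpa using hxy)]
        refine ih (ys.filter (fun z => decide (k z ≠ k y)))
          (le_trans (List.length_filter_le _ _) (Nat.le_of_succ_le_succ hl))
          (ht.filter _) ?_
        intro hm
        rcases List.mem_map.mp hm with ⟨z, hz, hzk⟩
        exact hxs (List.mem_map.mpr ⟨z, List.mem_of_mem_filter hz, hzk⟩)

-- inserting an element whose key is ALREADY PRESENT leaves the dedup unchanged
theorem pv_dedup_insertBy_dup {α K : Type} [LinearOrder K] [DecidableEq K] (k : α → K) (x : α) :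
    ∀ n (ys : List α), ys.length ≤ n →
    ys.Pairwise (fun a b => k a ≤ k b) → k x ∈ ys.map k →
    pvDedupK k (PySem.List.insertBy (pvKLt k) x ys) = pvDedupK k ys := by
  intro n
  induction n with
  | zero =>
    intro ys hl _ hm
    have : ys = [] := List.eq_nil_of_length_eq_zero (Nat.le_zero.mp hl)
    subst this
    simp at hm
  | succ n ih =>
    intro ys hl hs hm
    match ys with
    | [] => simp at hm
    | y :: ys =>
      rcases List.pairwise_cons.mp hs with ⟨hy, ht⟩
      by_cases hxy : k x = k y
      · have hlt : pvKLt k x y = false := by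
          simp [pvKLt, hxy]
        rw [show PySem.List.insertBy (pvKLt k) x (y :: ys)
            = y :: PySem.List.insertBy (pvKLt k) x ys from by
          simp [PySem.List.insertBy, hlt]]
        rw [pvDedupK, pvDedupK]
        congr 1
        rw [pv_filter_insertBy_neg k _ x ys (by simp [hxy])]
      · have hmem' : k x ∈ ys.map k := by
          rcases List.mem_map.mp hm with ⟨z, hz, hzk⟩
          rcases List.mem_cons.mp hz with hzy | hzz
          · exact absurd (hzy ▸ hzk).symm (fun h => hxy h)
          · exact List.mem_map.mpr ⟨z, hzz, hzk⟩
        rcases List.mem_map.mp hmem' with ⟨z, hz, hzk⟩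
        by_cases h : pvKLt k x y = true
        · exfalso
          have h1 : k x < k y := of_decide_eq_true h
          have h2 : k y ≤ k z := hy z hz
          rw [hzk] at h2
          exact absurd h1 (not_lt.mpr h2)
        · rw [show PySem.List.insertBy (pvKLt k) x (y :: ys)
              = y :: PySem.List.insertBy (pvKLt k) x ys from by
            simp [PySem.List.insertBy, h]]
          rw [pvDedupK, pvDedupK]
          congr 1
          rw [pv_filter_insertBy_pos k _ x ys ht (by simpa using hxy)]
          refine ih (ys.filter (fun w => decide (k w ≠ k y)))
            (le_trans (List.length_filter_le _ _) (Nat.le_of_succ_le_succ hl))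
            (ht.filter _) ?_
          refine List.mem_map.mpr ⟨z, List.mem_filter.mpr ⟨hz, ?_⟩, hzk⟩
          rw [hzk]
          simpa using hxy

theorem pv_sorted_append {α K : Type} [LinearOrder K] (key : α → K) (l : List α) (x : α) :
    PySem.List.sorted (l ++ [x]) key false
      = PySem.List.insertBy (pvKLt key) x (PySem.List.sorted l key false) := by
  rw [PySem.List.sorted_eq_foldl_insertBy, PySem.List.sorted_eq_foldl_insertBy, List.foldl_append]
  rfl

theorem pv_dedup_append_key {α K : Type} [DecidableEq K] (k : α → K) (x : α) :
    ∀ n (l : List α), l.length ≤ n →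
    pvDedupK k (l ++ [x]) = pvDedupK k l ++ (if k x ∈ l.map k then [] else [x]) := by
  intro n
  induction n with
  | zero =>
    intro l hl
    have : l = [] := List.eq_nil_of_length_eq_zero (Nat.le_zero.mp hl)
    subst this
    simp [pvDedupK]
  | succ n ih =>
    intro l hl
    match l with
    | [] => simp [pvDedupK]
    | y :: l =>
      rw [List.cons_append, pvDedupK, pvDedupK, List.filter_append]
      by_cases he : k x = k y
      · rw [show List.filter (fun z => decide (k z ≠ k y)) [x] = [] from by simp [he],
          List.append_nil, if_pos (show k x ∈ (y :: l).map k by simp [he])]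
        simp
      · have hp : decide (k x ≠ k y) = true := by simp [he]
        rw [show List.filter (fun z => decide (k z ≠ k y)) [x] = [x] from by simp [he]]
        rw [ih (l.filter (fun z => decide (k z ≠ k y)))
          (le_trans (List.length_filter_le _ _) (Nat.le_of_succ_le_succ hl))]
        have hmemiff : k x ∈ (l.filter (fun z => decide (k z ≠ k y))).map k ↔ k x ∈ l.map k := by
          constructor
          · intro h
            rcases List.mem_map.mp h with ⟨z, hz, hzk⟩
            exact List.mem_map.mpr ⟨z, List.mem_of_mem_filter hz, hzk⟩
          · intro h
            rcases List.mem_map.mp h with ⟨z, hz, hzk⟩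
            refine List.mem_map.mpr ⟨z, List.mem_filter.mpr ⟨hz, ?_⟩, hzk⟩
            rw [hzk]
            exact hp
        have hmem2 : (k x ∈ (y :: l).map k) ↔ k x ∈ l.map k := by
          simp [he]
        by_cases hmem : k x ∈ l.map k
        · rw [if_pos (hmemiff.mpr hmem), if_pos (hmem2.mpr hmem)]
          simp
        · rw [if_neg (fun hc => hmem (hmemiff.mp hc)), if_neg (fun hc => hmem (hmem2.mp hc))]
          simp

-- stable sort by the dedup key itself commutes with keep-first dedup
theorem pv_comm {α K : Type} [LinearOrder K] [DecidableEq K] (k : α → K) (l : List α) :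
    PySem.List.sorted (pvDedupK k l) k false = pvDedupK k (PySem.List.sorted l k false) := by
  induction l using List.reverseRecOn with
  | nil => simp [PySem.List.sorted, pvDedupK]
  | append_singleton l x ih =>
    have hpair : (PySem.List.sorted l k false).Pairwise (fun a b => k a ≤ k b) :=
      PySem.List.sorted_pairwise l k
    rw [pv_dedup_append_key k x l.length l le_rfl, pv_sorted_append]
    by_cases hmem : k x ∈ l.map k
    · have hmem' : k x ∈ (PySem.List.sorted l k false).map k := by
        rcases List.mem_map.mp hmem with ⟨z, hz, hzk⟩
        exact List.mem_map.mpr ⟨z, (PySem.List.mem_sorted l k false z).mpr hz, hzk⟩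
      rw [if_pos hmem, List.append_nil, ih,
        pv_dedup_insertBy_dup k x (PySem.List.sorted l k false).length _ le_rfl hpair hmem']
    · have hmem' : k x ∉ (PySem.List.sorted l k false).map k := by
        intro hm
        rcases List.mem_map.mp hm with ⟨z, hz, hzk⟩
        exact hmem (List.mem_map.mpr ⟨z, (PySem.List.mem_sorted l k false z).mp hz, hzk⟩)
      rw [if_neg hmem, pv_sorted_append, ih,
        pv_dedup_insertBy_fresh k x (PySem.List.sorted l k false).length _ le_rfl hpair hmem']

-- the previous-key loop, recursively
def pvPrevLoop {α K : Type} [DecidableEq K] (k : α → K) : Option K → List α → List α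
  | _, [] => []
  | p, x :: xs => if some (k x) ≠ p then x :: pvPrevLoop k (some (k x)) xs else pvPrevLoop k p xs

-- B's fold is the previous-key loop
theorem pv_foldB (l : List (Int × List (String × String)))
    (p : Option (String × String)) (acc : List (Int × List (String × String))) :
    (l.foldl pvStepB (p, acc)).2 = acc ++ pvPrevLoop (fun e => pvK e.2) p l := by
  induction l generalizing p acc with
  | nil => simp [pvPrevLoop]
  | cons e l ih =>
    rw [List.foldl_cons]
    by_cases h : some (pvK e.2) = p
    · rw [show pvStepB (p, acc) e = (p, acc) from by simp [pvStepB, h], ih,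
        show pvPrevLoop (fun e => pvK e.2) p (e :: l)
          = pvPrevLoop (fun e => pvK e.2) p l from by simp [pvPrevLoop, h]]
    · rw [show pvStepB (p, acc) e = (some (pvK e.2), acc ++ [e]) from by simp [pvStepB, h], ih,
        show pvPrevLoop (fun e => pvK e.2) p (e :: l)
          = e :: pvPrevLoop (fun e => pvK e.2) (some (pvK e.2)) l from by simp [pvPrevLoop, h]]
      simp

-- on a key-sorted list, the previous-key loop started below every key is keep-first dedup of the rest
-- (s is the sort key, k the comparison key; they determine the same equalities)
theorem pv_prevLoop_some {α K S : Type} [DecidableEq K] [LinearOrder S] (k : α → K) (s : α → S)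
    (hiff : ∀ a b, s a = s b ↔ k a = k b) (l : List α) :
    ∀ a₀, l.Pairwise (fun a b => s a ≤ s b) → (∀ y ∈ l, s a₀ ≤ s y) →
    pvPrevLoop k (some (k a₀)) l = pvDedupK k (l.filter (fun z => decide (k z ≠ k a₀))) := by
  induction l with
  | nil => intro a₀ _ _; simp [pvPrevLoop, pvDedupK]
  | cons y ys ih =>
    intro a₀ hs hb
    rcases List.pairwise_cons.mp hs with ⟨hy, ht⟩
    by_cases h : k y = k a₀
    · rw [show pvPrevLoop k (some (k a₀)) (y :: ys) = pvPrevLoop k (some (k a₀)) ys from by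
        simp [pvPrevLoop, h],
        show (y :: ys).filter (fun z => decide (k z ≠ k a₀))
          = ys.filter (fun z => decide (k z ≠ k a₀)) from by simp [h]]
      have hsy : s y = s a₀ := (hiff y a₀).mpr h
      exact ih a₀ ht (fun z hz => hsy ▸ hy z hz)
    · have hlt : s a₀ < s y :=
        lt_of_le_of_ne (hb y (by simp)) (fun hc => h ((hiff y a₀).mp hc.symm))
      have hrest : ys.filter (fun z => decide (k z ≠ k a₀)) = ys := by
        apply List.filter_eq_self.mpr
        intro z hz
        simp only [decide_eq_true_eq, ne_eq]
        intro hc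
        have hsz : s z = s a₀ := (hiff z a₀).mpr hc
        exact absurd (hsz ▸ hy z hz) (not_le.mpr hlt)
      rw [show pvPrevLoop k (some (k a₀)) (y :: ys) = y :: pvPrevLoop k (some (k y)) ys from by
        simp [pvPrevLoop, h],
        show (y :: ys).filter (fun z => decide (k z ≠ k a₀))
          = y :: ys.filter (fun z => decide (k z ≠ k a₀)) from by simp [h],
        hrest, pvDedupK]
      exact congrArg _ (ih y ht hy)

theorem pv_prevLoop_none {α K S : Type} [DecidableEq K] [LinearOrder S] (k : α → K) (s : α → S)
    (hiff : ∀ a b, s a = s b ↔ k a = k b) (l : List α)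
    (hs : l.Pairwise (fun a b => s a ≤ s b)) :
    pvPrevLoop k none l = pvDedupK k l := by
  cases l with
  | nil => simp [pvPrevLoop, pvDedupK]
  | cons y ys =>
    rcases List.pairwise_cons.mp hs with ⟨hy, ht⟩
    rw [show pvPrevLoop k none (y :: ys) = y :: pvPrevLoop k (some (k y)) ys from by
      simp [pvPrevLoop], pvDedupK]
    exact congrArg _ (pv_prevLoop_some k s hiff ys y ht hy)

-- keep-first dedup is a sublist
theorem pv_dedup_sublist {α K : Type} [DecidableEq K] (k : α → K) :
    ∀ n (l : List α), l.length ≤ n → (pvDedupK k l).Sublist l := by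
  intro n
  induction n with
  | zero =>
    intro l hl
    have : l = [] := List.eq_nil_of_length_eq_zero (Nat.le_zero.mp hl)
    subst this
    simp [pvDedupK]
  | succ n ih =>
    intro l hl
    match l with
    | [] => simp [pvDedupK]
    | y :: ys =>
      rw [pvDedupK]
      exact (List.Sublist.cons₂ y
        ((ih _ (le_trans (List.length_filter_le _ _) (Nat.le_of_succ_le_succ hl))).trans
          List.filter_sublist))

-- keep-first dedup depends on the key only through its equalities
theorem pv_dedup_congr {α K K' : Type} [DecidableEq K] [DecidableEq K'] (k : α → K) (k' : α → K')
    (h : ∀ a b, k' a = k' b ↔ k a = k b) :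
    ∀ n (l : List α), l.length ≤ n → pvDedupK k' l = pvDedupK k l := by
  intro n
  induction n with
  | zero =>
    intro l hl
    have : l = [] := List.eq_nil_of_length_eq_zero (Nat.le_zero.mp hl)
    subst this
    simp [pvDedupK]
  | succ n ih =>
    intro l hl
    match l with
    | [] => simp [pvDedupK]
    | y :: ys =>
      rw [pvDedupK, pvDedupK,
        show ys.filter (fun z => decide (k' z ≠ k' y)) = ys.filter (fun z => decide (k z ≠ k y))
          from List.filter_congr (fun z _ => by simp [h z y])]
      exact congrArg _ (ih _ (le_trans (List.length_filter_le _ _) (Nat.le_of_succ_le_succ hl)))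

-- keep-first dedup commutes with un-decoration (the key factors through the projection)
theorem pv_dedup_map {α β K : Type} [DecidableEq K] (f : α → β) (k : β → K) :
    ∀ n (l : List α), l.length ≤ n →
    (pvDedupK (fun a => k (f a)) l).map f = pvDedupK k (l.map f) := by
  intro n
  induction n with
  | zero =>
    intro l hl
    have : l = [] := List.eq_nil_of_length_eq_zero (Nat.le_zero.mp hl)
    subst this
    simp [pvDedupK]
  | succ n ih =>
    intro l hl
    match l with
    | [] => simp [pvDedupK]
    | y :: ys =>
      rw [pvDedupK, List.map_cons, List.map_cons, pvDedupK, List.filter_map]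
      exact congrArg _ (ih _ (le_trans (List.length_filter_le _ _) (Nat.le_of_succ_le_succ hl)))

-- sorting by (timestamp, original index) and dropping the tags IS the stable sort by timestamp,
-- when the tags are strictly increasing
theorem pv_insert_map (x : Int × List (String × String)) (L : List (Int × List (String × String)))
    (h : ∀ e ∈ L, e.1 < x.1) :
    (PySem.List.insertBy (pvKLt pvLexTI) x L).map (·.2)
      = PySem.List.insertBy (pvKLt pvT) x.2 (L.map (·.2)) := by
  induction L with
  | nil => rfl
  | cons y t ih =>
    have hxy : pvKLt pvLexTI x y = pvKLt pvT x.2 y.2 := by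
      have hyx : ¬ x.1 < y.1 := not_lt.mpr (le_of_lt (h y (by simp)))
      simp only [pvKLt, pvLexTI, Prod.Lex.toLex_lt_toLex]
      by_cases ht : pvT x.2 < pvT y.2 <;> simp [ht, hyx]
    by_cases hc : pvKLt pvT x.2 y.2 = true
    · simp [PySem.List.insertBy, hxy, hc]
    · simp only [PySem.List.insertBy, hxy, hc, Bool.false_eq_true, if_false, List.map_cons]
      exact congrArg _ (ih (fun e he => h e (by simp [he])))

theorem pv_sorted_map (l : List (Int × List (String × String)))
    (h : l.Pairwise (fun a b => a.1 < b.1)) :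
    (PySem.List.sorted l pvLexTI false).map (·.2)
      = PySem.List.sorted (l.map (·.2)) pvT false := by
  induction l using List.reverseRecOn with
  | nil => simp [PySem.List.sorted]
  | append_singleton l x ih =>
    rcases List.pairwise_append.mp h with ⟨hl, _, hcross⟩
    have hsub : ∀ e ∈ PySem.List.sorted l pvLexTI false, e.1 < x.1 := by
      intro e he
      exact hcross e ((PySem.List.mem_sorted l pvLexTI false e).mp he) x (by simp)
    rw [pv_sorted_append, pv_insert_map x _ hsub, ih hl, List.map_append, List.map_cons,
      List.map_nil, pv_sorted_append]

-- two sorts by (timestamp, index) of permuted lists with distinct tags coincide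
theorem pv_sorted_perm_strict (xs ys : List (Int × List (String × String)))
    (hp : xs.Perm ys) (hnd : (ys.map (·.1)).Nodup) :
    PySem.List.sorted xs pvLexTI false = PySem.List.sorted ys pvLexTI false := by
  have hZp : (PySem.List.sorted ys pvLexTI false).Perm xs :=
    (PySem.List.sorted_perm ys pvLexTI false).trans (hp.symm)
  have hle : (PySem.List.sorted ys pvLexTI false).Pairwise
      (fun a b => pvLexTI a ≤ pvLexTI b) := PySem.List.sorted_pairwise ys pvLexTI
  have hnd' : ((PySem.List.sorted ys pvLexTI false).map (·.1)).Nodup :=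
    (((PySem.List.sorted_perm ys pvLexTI false).map (·.1)).nodup_iff).mpr hnd
  have hne : (PySem.List.sorted ys pvLexTI false).Pairwise (fun a b => a.1 ≠ b.1) :=
    List.pairwise_map.mp hnd'
  have hlt : (PySem.List.sorted ys pvLexTI false).Pairwise
      (fun a b => pvLexTI a < pvLexTI b) := by
    refine (hle.and hne).imp ?_
    rintro a b ⟨h1, h2⟩
    refine lt_of_le_of_ne h1 (fun hc => h2 ?_)
    have := toLex.injective.eq_iff.mp (hc : pvLexTI a = pvLexTI b)
    exact congrArg Prod.snd this
  exact PySem.List.sorted_eq_of_perm_of_pairwise_lt xs _ pvLexTI hZp hlt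

-- A's dict loop builds exactly the keep-first dedup of the kept rows (values in insertion order)
theorem pv_dict_contains (d : PySem.Dict (String × String) (List (String × String)))
    (k : String × String) :
    d.contains k = decide (k ∈ d.keys) := PySem.Dict.contains_eq_decide_mem_keys d k

theorem pv_bridge_A (l : List (List (String × String)))
    (d : PySem.Dict (String × String) (List (String × String))) :
    PySem.Dict.values (l.foldl pvStepA d)
    = d.values ++ pvDedupK pvK ((l.filter pvKeep).filter (fun r => !(d.contains (pvK r)))) := by
  induction l generalizing d with
  | nil => simp [pvDedupK]
  | cons r l ih =>
    rw [List.foldl_cons, List.filter_cons]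
    by_cases hk : pvKeep r = true
    · by_cases hm : pvK r ∈ d.keys
      · rw [show pvStepA d r = d from by simp [pvStepA, hk, pv_dict_contains, hm]]
        rw [ih d]
        rw [if_pos hk, List.filter_cons, if_neg (by simp [pv_dict_contains, hm])]
      · have hc : d.contains (pvK r) = false := by simp [pv_dict_contains, hm]
        rw [show pvStepA d r = d.insert (pvK r) r from by simp [pvStepA, hk, hc]]
        rw [ih]
        have hval : (d.insert (pvK r) r).values = d.values ++ [r] := by
          show ((d.insert (pvK r) r).items).map (·.2) = (d.items).map (·.2) ++ [r]
          rw [PySem.Dict.items_insert_of_not_contains d r hc]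
          simp
        have hfil : (l.filter pvKeep).filter (fun s => !((d.insert (pvK r) r).contains (pvK s)))
            = ((l.filter pvKeep).filter (fun s => !(d.contains (pvK s)))).filter
                (fun s => decide (pvK s ≠ pvK r)) := by
          rw [List.filter_filter, List.filter_filter, List.filter_filter]
          apply List.filter_congr
          intro s _
          rw [PySem.Dict.contains_insert]
          simp only [pv_dict_contains]
          by_cases h1 : pvK s ∈ d.keys <;> by_cases h2 : pvK s = pvK r <;>
            cases h3 : pvKeep s <;> simp [h1, h2]
        rw [hval, hfil]
        rw [if_pos hk, List.filter_cons, if_pos (by simp [hc]),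
          show pvDedupK pvK (r :: (l.filter pvKeep).filter (fun s => !(d.contains (pvK s))))
            = r :: pvDedupK pvK (((l.filter pvKeep).filter
                (fun s => !(d.contains (pvK s)))).filter (fun s => decide (pvK s ≠ pvK r)))
            from by rw [pvDedupK]]
        simp
    · rw [show pvStepA d r = d from by simp [pvStepA, hk], if_neg hk]
      exact ih d

-- ===== VERDICT (by name: the statement is the Claim_ definition above) =====
theorem combine_and_sort_spec : Claim_equal_combine_and_sort := by
  intro rows _
  show combine_and_sort rows = combine_and_sort_alt rows
  have hEfst : ((PySem.List.enumerate rows).filter (fun e => pvKeep e.2)).Pairwise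
      (fun a b => a.1 < b.1) :=
    List.Pairwise.sublist List.filter_sublist (PySem.List.pairwise_lt_enumerate rows 0)
  have hEmap : ((PySem.List.enumerate rows).filter (fun e => pvKeep e.2)).map (·.2)
      = rows.filter pvKeep := by
    rw [show (fun e : Int × List (String × String) => pvKeep e.2) = (pvKeep ∘ (fun x => x.2))
      from rfl, ← List.filter_map, PySem.List.map_snd_enumerate]
  -- A side
  have hA : combine_and_sort rows
      = PySem.List.sorted (pvDedupK pvK (rows.filter pvKeep)) pvT false := by
    show PySem.List.sorted (PySem.Dict.values (rows.foldl pvStepA PySem.Dict.empty))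
      (fun x => pvT x) false = _
    rw [pv_bridge_A rows PySem.Dict.empty]
    simp [PySem.Dict.values, PySem.Dict.empty, PySem.Dict.contains]
  -- B side, stage by stage
  have h1 : PySem.List.sorted2 ((PySem.List.enumerate rows).filter (fun e => pvKeep e.2))
      (fun e => pvT e.2) (fun e => pvC e.2) false
      = PySem.List.sorted ((PySem.List.enumerate rows).filter (fun e => pvKeep e.2))
          pvLexTC false := pv_sorted2_eq _ _ _
  have hiffTC : ∀ a b : Int × List (String × String),
      pvLexTC a = pvLexTC b ↔ pvK a.2 = pvK b.2 := by
    intro a b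
    exact toLex.injective.eq_iff
  have hfold : ∀ l : List (Int × List (String × String)),
      (l.foldl pvStepB (none, [])).2 = pvPrevLoop (fun e => pvK e.2) none l := by
    intro l
    rw [pv_foldB, List.nil_append]
  have hF := pv_dedup_sublist pvLexTC ((PySem.List.enumerate rows).filter (fun e => pvKeep e.2)).length _ le_rfl
  have hFfst : (pvDedupK pvLexTC ((PySem.List.enumerate rows).filter (fun e => pvKeep e.2))).Pairwise
      (fun a b => a.1 < b.1) := List.Pairwise.sublist hF hEfst
  have hfirsts : ((PySem.List.sorted ((PySem.List.enumerate rows).filter (fun e => pvKeep e.2))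
        pvLexTC false).foldl pvStepB (none, [])).2
      = PySem.List.sorted
          (pvDedupK pvLexTC ((PySem.List.enumerate rows).filter (fun e => pvKeep e.2)))
          pvLexTC false := by
    rw [hfold,
      pv_prevLoop_none (fun e => pvK e.2) pvLexTC (fun a b => (hiffTC a b))
        _ (PySem.List.sorted_pairwise _ pvLexTC),
      pv_dedup_congr pvLexTC (fun e => pvK e.2) (fun a b => (hiffTC a b).symm) _ _ le_rfl,
      pv_comm pvLexTC]
  have h2 : PySem.List.sorted2
      (PySem.List.sorted
        (pvDedupK pvLexTC ((PySem.List.enumerate rows).filter (fun e => pvKeep e.2)))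
        pvLexTC false)
      (fun e => pvT e.2) (fun e => e.1) false
      = PySem.List.sorted
          (PySem.List.sorted
            (pvDedupK pvLexTC ((PySem.List.enumerate rows).filter (fun e => pvKeep e.2)))
            pvLexTC false)
          pvLexTI false := pv_sorted2_eq _ _ _
  have hnd : ((pvDedupK pvLexTC ((PySem.List.enumerate rows).filter (fun e => pvKeep e.2))).map
      (·.1)).Nodup := List.pairwise_map.mpr (hFfst.imp (fun h => ne_of_lt h))
  have h3 : PySem.List.sorted
      (PySem.List.sorted
        (pvDedupK pvLexTC ((PySem.List.enumerate rows).filter (fun e => pvKeep e.2)))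
        pvLexTC false)
      pvLexTI false
      = PySem.List.sorted
          (pvDedupK pvLexTC ((PySem.List.enumerate rows).filter (fun e => pvKeep e.2)))
          pvLexTI false :=
    pv_sorted_perm_strict _ _ (PySem.List.sorted_perm _ pvLexTC false) hnd
  have hmapF : (pvDedupK pvLexTC ((PySem.List.enumerate rows).filter (fun e => pvKeep e.2))).map
      (·.2) = pvDedupK pvK (rows.filter pvKeep) := by
    have e1 := pv_dedup_map (fun e : Int × List (String × String) => e.2)
      (fun r : List (String × String) => (toLex (pvK r) : Lex (String × String)))
      ((PySem.List.enumerate rows).filter (fun e => pvKeep e.2)).length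
      ((PySem.List.enumerate rows).filter (fun e => pvKeep e.2)) le_rfl
    rw [show pvLexTC = (fun e : Int × List (String × String) =>
        ((fun r : List (String × String) => (toLex (pvK r) : Lex (String × String))) e.2)) from rfl,
      e1, hEmap]
    exact pv_dedup_congr pvK (fun r : List (String × String) =>
      (toLex (pvK r) : Lex (String × String))) (fun a b => toLex.injective.eq_iff) _ _ le_rfl
  show combine_and_sort rows
      = (PySem.List.sorted2
          ((PySem.List.sorted2 ((PySem.List.enumerate rows).filter (fun e => pvKeep e.2))
            (fun e => pvT e.2) (fun e => pvC e.2) false).foldl pvStepB (none, [])).2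
          (fun e => pvT e.2) (fun e => e.1) false).map (·.2)
  rw [h1, hfirsts, h2, h3, pv_sorted_map _ hFfst, hmapF, hA]
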